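-- pv_equiv track=rewrite | github.com/nubs01/blechpy | blechpy/utils/print_tools.py | print_list_table
-- ===== SOURCE A (Python) =====
-- from copy import deepcopy
--
-- def print_list_table(lis,headers=[]):
--     '''Make a string from list of lists with columns for each list
--
--     Parameters
--     ----------
--     lis : list of lists, data to print
--     headers: list of str (optional), headers for each column
--
--     Returns
--     -------
--     str : string represenation of list of lists as table
--     '''
--     lis = deepcopy(lis)
--     if headers is not None:
--         for x,y in zip(lis,headers):
--             x.insert(0,'-'*len(y))
--             x.insert(0,y)
--
--     # Match lengths
--     max_len = max([len(x) for x in lis])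
--     for x in lis:
--         while len(x)<max_len:
--             x.append('')
--     fmt = '\t'.join(['{%i}' % x for x in range(len(lis))])
--     out = []
--     for x in zip(*lis):
--         out.append(fmt.format(*x))
--     out = '\n'.join(out)
--     return out
-- ===== SOURCE B (Python) =====
-- def print_list_table(lis, headers=[]):
--     '''Make a string from list of lists with columns for each list (tab-separated table).'''
--     # Online transpose: one pass over the columns, maintaining the grown row table.
--     rows = []   # rows[i] = cells of output row i, all of length `seen`
--     seen = 0    # number of columns merged so far
--     for j, col in enumerate(lis):
--         if headers is not None and j < len(headers):
--             h = headers[j]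
--             cells = [h, '-' * len(h)] + list(col)
--         else:
--             cells = list(col)
--         for i, v in enumerate(cells):
--             if i < len(rows):
--                 rows[i].append(v)
--             else:
--                 rows.append([''] * seen + [v])
--         for i in range(len(cells), len(rows)):
--             rows[i].append('')
--         seen += 1
--     return '\n'.join('\t'.join(r) for r in rows)
-- ===== Notes on version B (the rewrite author's own statement) =====
-- stated objective: alternative
-- what changed: Replaces deepcopy + in-place header insertion + compute max length + pad every column + zip-transpose (two staged passes over a rectangularised table) with a single left-to-right pass over the columns that maintains a growing row table (an online transpose: each column is merged into the existing rows, extending the table and back-filling '' as needed), so no max pass, no padding pass and no transpose step exist.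
-- outside the precondition, e.g. on print_list_table([], []): A raises ValueError, B returns ''
import Mathlib
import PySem

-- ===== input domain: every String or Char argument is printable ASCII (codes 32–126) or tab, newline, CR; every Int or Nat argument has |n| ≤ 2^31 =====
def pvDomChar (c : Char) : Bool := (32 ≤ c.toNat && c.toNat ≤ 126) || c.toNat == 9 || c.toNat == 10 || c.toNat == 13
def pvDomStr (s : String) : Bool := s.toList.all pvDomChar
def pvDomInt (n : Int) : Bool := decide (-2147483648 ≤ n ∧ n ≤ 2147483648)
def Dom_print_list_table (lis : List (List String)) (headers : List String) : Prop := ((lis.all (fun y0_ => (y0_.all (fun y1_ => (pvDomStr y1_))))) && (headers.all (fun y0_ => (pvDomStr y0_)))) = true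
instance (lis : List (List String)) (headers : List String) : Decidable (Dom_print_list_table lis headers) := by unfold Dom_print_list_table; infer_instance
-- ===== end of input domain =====

-- B replaces A's deepcopy + header insert + max + pad-to-max + zip-transpose staging by a single
-- pass over the columns that merges each column into a growing row table (objective: alternative).

-- ===== PORT A =====
-- 'for x,y in zip(lis,headers): x.insert(0,'-'*len(y)); x.insert(0,y)' on the deepcopy
def pvAddHeaders : List (List String) → List String → List (List String)
  | xs, [] => xs
  | [], _ :: _ => []
  | x :: xs, y :: ys =>
      (y :: String.ofList (List.replicate (PySem.Str.len y).toNat '-') :: x) :: pvAddHeaders xs ys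

-- termination helper for pvZipStar, cited below
theorem pv_attach_tail_sum (cols : List (List String)) :
    (List.map List.length (List.map (fun x : {x // x ∈ cols} => (↑x : List String).tail)
      cols.attach)).sum = (cols.map (List.length ∘ List.tail)).sum := by
  rw [List.map_map]
  simp only [Function.comp_def, List.map_subtype, List.unattach_attach]

-- zip(*lis): rows while every column is nonempty (exactly Python's zip of the columns)
def pvZipStar (cols : List (List String)) : List (List String) :=
  if h : cols ≠ [] ∧ cols.all (fun c => !c.isEmpty) then
    (cols.map (fun c => c.headD "")) :: pvZipStar (cols.map (fun c => c.tail))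
  else []
termination_by ((cols.map List.length).sum)
decreasing_by
  rw [pv_attach_tail_sum]
  rcases cols with _ | ⟨c, rest⟩
  · simp at h
  · obtain ⟨-, hall⟩ := h
    simp only [List.all_cons, Bool.and_eq_true] at hall
    have hrest : (rest.map (List.length ∘ List.tail)).sum ≤ (rest.map List.length).sum := by
      apply List.sum_le_sum
      intro x hx
      simp [List.length_tail]
    rcases c with _ | ⟨a, t⟩
    · simp at hall
    · simp only [List.map_cons, List.sum_cons, Function.comp_apply, List.tail_cons,
        List.length_cons]
      omega

def print_list_table (lis : List (List String)) (headers : List String) : String :=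
  -- lis = deepcopy(lis); header loop ('headers is not None' is always true at type List String)
  let lis' := pvAddHeaders lis headers
  -- max_len = max([len(x) for x in lis])  (max() raises on [], excluded by Pre_; getD 0 unreached there)
  let maxLen := (PySem.List.max? (lis'.map (fun x => (x.length : Int))) (fun v => v)).getD 0
  -- while len(x) < max_len: x.append('')
  let padded := lis'.map (fun x => x ++ List.replicate (maxLen.toNat - x.length) "")
  -- fmt = '\t'.join('{%i}'); fmt.format(*x) on string cells is exactly '\t'-joining the row
  PySem.Str.join "\n" ((pvZipStar padded).map (fun row => PySem.Str.join "\t" row))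

-- ===== PORT B =====
-- merge one column's cells into the existing row table (rows all of width s):
-- the 'for i, v in enumerate(cells)' / 'for i in range(len(cells), len(rows))' pair of Source B
def pvMerge : List (List String) → List String → Nat → List (List String)
  | [], [], _ => []
  | [], v :: vs, s => (List.replicate s "" ++ [v]) :: pvMerge [] vs s
  | r :: rs, [], s => (r ++ [""]) :: pvMerge rs [] s
  | r :: rs, v :: vs, s => (r ++ [v]) :: pvMerge rs vs s

def print_list_table_alt (lis : List (List String)) (headers : List String) : String :=
  -- single pass: fold the columns into (rows, seen)
  let st := (PySem.List.enumerate lis).foldl (fun st jc =>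
      let cells := if jc.1 < (headers.length : Int) then
          let h := headers.getD jc.1.toNat ""
          h :: String.ofList (List.replicate (PySem.Str.len h).toNat '-') :: jc.2
        else jc.2
      (pvMerge st.1 cells st.2, st.2 + 1)) (([] : List (List String)), 0)
  PySem.Str.join "\n" (st.1.map (fun r => PySem.Str.join "\t" r))

-- ===== PRECONDITION & SPEC =====
-- Pre_ excludes lis = [], where Python A raises ValueError (max() of an empty sequence).
def Pre_print_list_table (lis : List (List String)) (headers : List String) : Prop := lis ≠ []
instance (lis : List (List String)) (headers : List String) : Decidable (Pre_print_list_table lis headers) := by unfold Pre_print_list_table; infer_instance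
def pvWitness_print_list_table : List (List String) × List String := ([["a", "bb"], ["c"]], ["X"])

def Spec_print_list_table (lis : List (List String)) (headers : List String) (out : String) : Prop := out = print_list_table_alt lis headers
instance (lis : List (List String)) (headers : List String) (out : String) : Decidable (Spec_print_list_table lis headers out) := by unfold Spec_print_list_table; infer_instance

-- ===== CLAIM (what is proved, stated in full; the proofs are below) =====
def Claim_equal_print_list_table : Prop := ∀ (lis : List (List String)) (headers : List String), Dom_print_list_table lis headers → Pre_print_list_table lis headers → Spec_print_list_table lis headers (print_list_table lis headers)
-- ===== LEMMAS AND PROOFS =====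

-- the common characterisation: row i of the table is the i-th cell of every column ('' past the end)
def pvMaxLen (cs : List (List String)) : Nat := (cs.map List.length).foldr Nat.max 0
def pvGather (cs : List (List String)) : List (List String) :=
  (List.range (pvMaxLen cs)).map (fun i => cs.map (fun c => c.getD i ""))

-- B's enumerate/map column construction equals A's zip-insert loop
theorem pv_cols_eq (headers : List String) :
    ∀ (lis : List (List String)) (s : Nat),
      (PySem.List.enumerate lis (s : Int)).map (fun jc =>
        if jc.1 < (headers.length : Int) then
          let h := headers.getD jc.1.toNat ""
          h :: String.ofList (List.replicate (PySem.Str.len h).toNat '-') :: jc.2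
        else jc.2)
      = pvAddHeaders lis (headers.drop s) := by
  intro lis
  induction lis with
  | nil => intro s; simp [PySem.List.enumerate_nil]; cases headers.drop s <;> simp [pvAddHeaders]
  | cons x xs ih =>
    intro s
    rw [PySem.List.enumerate_cons]
    by_cases hs : s < headers.length
    · have hd : headers.drop s = headers[s] :: headers.drop (s + 1) :=
        (List.drop_eq_getElem_cons hs)
      have : ((s : Int) + 1) = ((s + 1 : Nat) : Int) := by push_cast; ring
      rw [List.map_cons, this, ih (s + 1), hd]
      simp only [pvAddHeaders]
      have hcond : ((s : Int) < (headers.length : Int)) := by exact_mod_cast hs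
      simp [hcond, Int.toNat_natCast, List.getD_eq_getElem?_getD, List.getElem?_eq_getElem hs]
    · have hd : headers.drop s = [] := List.drop_eq_nil_of_le (by omega)
      have hd' : headers.drop (s + 1) = [] := List.drop_eq_nil_of_le (by omega)
      have : ((s : Int) + 1) = ((s + 1 : Nat) : Int) := by push_cast; ring
      rw [List.map_cons, this, ih (s + 1), hd, hd']
      have hcond : ¬ ((s : Int) < (headers.length : Int)) := by exact_mod_cast hs
      simp [hcond, pvAddHeaders]

theorem pv_getD_tail (c : List String) (i : Nat) :
    c.tail.getD i "" = c.getD (i + 1) "" := by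
  cases c <;> simp [List.getD]

theorem pv_pad_getD (c : List String) (n i : Nat) :
    (c ++ List.replicate n "").getD i "" = c.getD i "" := by
  induction c generalizing i with
  | nil =>
    simp only [List.nil_append, List.getD_eq_getElem?_getD,
      List.getElem?_replicate]
    split <;> simp
  | cons a t ih =>
    cases i with
    | zero => simp [List.getD]
    | succ j => simpa [List.getD] using ih j

-- zip(*cols) of equal-length columns is the index-gathered row list
theorem pv_zipStar_uniform :
    ∀ (L : Nat) (cols : List (List String)), cols ≠ [] → (∀ c ∈ cols, c.length = L) →
      pvZipStar cols = (List.range L).map (fun i => cols.map (fun c => c.getD i "")) := by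
  intro L
  induction L with
  | zero =>
    intro cols hne hlen
    rcases cols with _ | ⟨c, rest⟩
    · exact absurd rfl hne
    · have : c = [] := List.eq_nil_of_length_eq_zero (hlen c (by simp))
      rw [pvZipStar.eq_def]
      simp [this]
  | succ n ih =>
    intro cols hne hlen
    have hall : cols.all (fun c => !c.isEmpty) = true := by
      simp only [List.all_eq_true]
      intro c hc
      have hl := hlen c hc
      rcases c with _ | ⟨a, t⟩
      · simp at hl
      · simp
    rw [pvZipStar.eq_def]
    rw [dif_pos ⟨hne, hall⟩]
    have htne : cols.map List.tail ≠ [] := by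
      simpa using hne
    have htlen : ∀ c ∈ cols.map List.tail, c.length = n := by
      intro c hc
      obtain ⟨c0, hc0, rfl⟩ := List.mem_map.mp hc
      have := hlen c0 hc0
      simp [List.length_tail, this]
    rw [ih (cols.map List.tail) htne htlen]
    rw [List.range_succ_eq_map]
    rw [List.map_cons, List.map_map]
    refine congrArg₂ List.cons ?_ ?_
    · exact List.map_congr_left (fun c _ => by cases c <;> simp [List.getD])
    · apply List.map_congr_left
      intro i _
      rw [List.map_map]
      exact List.map_congr_left (fun c _ => pv_getD_tail c i)

-- pvAddHeaders keeps the number of columns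
theorem pv_length_addHeaders : ∀ (xs : List (List String)) (ys : List String),
    (pvAddHeaders xs ys).length = xs.length := by
  intro xs
  induction xs with
  | nil => intro ys; cases ys <;> simp [pvAddHeaders]
  | cons x xs ih => intro ys; cases ys <;> simp [pvAddHeaders, ih]

-- every column length is bounded by pvMaxLen
theorem pv_len_le_maxLen (cs : List (List String)) : ∀ c ∈ cs, c.length ≤ pvMaxLen cs := by
  unfold pvMaxLen
  induction cs with
  | nil => intro c hc; cases hc
  | cons a t ih =>
    intro c hc
    simp only [List.map_cons, List.foldr_cons]
    rcases List.mem_cons.mp hc with h | h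
    · subst h; exact Nat.le_max_left _ _
    · exact le_trans (ih c h) (Nat.le_max_right _ _)

theorem pv_maxLen_le (cs : List (List String)) (b : Nat)
    (h : ∀ c ∈ cs, c.length ≤ b) : pvMaxLen cs ≤ b := by
  unfold pvMaxLen
  induction cs with
  | nil => simp
  | cons a t ih =>
    simp only [List.map_cons, List.foldr_cons]
    have h1 := h a (by simp)
    have h2 := ih (fun c hc => h c (by simp [hc]))
    exact Nat.max_le.mpr ⟨h1, h2⟩

-- pvMerge computed pointwise
theorem pvMerge_spec : ∀ (rows : List (List String)) (c : List String) (s : Nat),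
    pvMerge rows c s = (List.range (Nat.max rows.length c.length)).map
      (fun i => rows.getD i (List.replicate s "") ++ [c.getD i ""]) := by
  intro rows c s
  induction rows, c, s using pvMerge.induct with
  | case1 s => simp [pvMerge]
  | case2 v vs s ih =>
    rw [pvMerge, ih]
    simp only [List.length_nil, List.length_cons, Nat.max_eq_right (Nat.zero_le _)]
    rw [List.range_succ_eq_map, List.map_cons, List.map_map]
    simp [List.getD]
  | case3 r rs s ih =>
    rw [pvMerge, ih]
    simp only [List.length_nil, List.length_cons, Nat.max_eq_left (Nat.zero_le _)]
    rw [List.range_succ_eq_map, List.map_cons, List.map_map]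
    simp [List.getD]
  | case4 r rs v vs s ih =>
    rw [pvMerge, ih]
    simp only [List.length_cons, Nat.succ_max_succ]
    rw [List.range_succ_eq_map, List.map_cons, List.map_map]
    simp [List.getD]

-- beyond every column, the gathered row is all-blank
theorem pv_row_blank (cs : List (List String)) (i : Nat) (hi : pvMaxLen cs ≤ i) :
    cs.map (fun c => c.getD i "") = List.replicate cs.length "" := by
  rw [List.eq_replicate_iff]
  refine ⟨by simp, ?_⟩
  intro b hb
  obtain ⟨c, hc, rfl⟩ := List.mem_map.mp hb
  have := pv_len_le_maxLen cs c hc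
  exact List.getD_eq_default _ _ (by omega)

-- merging one more column into the gathered table gathers the extended column list
theorem pv_foldr_max_base (l : List Nat) (b : Nat) :
    l.foldr Nat.max b = Nat.max (l.foldr Nat.max 0) b := by
  induction l with
  | nil => simp
  | cons x t ih => simp [List.foldr_cons, ih, Nat.max_assoc]

theorem pv_gather_snoc (pre : List (List String)) (c : List String) :
    pvMerge (pvGather pre) c pre.length = pvGather (pre ++ [c]) := by
  have hlen : (pvGather pre).length = pvMaxLen pre := by simp [pvGather]
  have hmax : pvMaxLen (pre ++ [c]) = Nat.max (pvMaxLen pre) c.length := by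
    unfold pvMaxLen
    rw [List.map_append, List.foldr_append, pv_foldr_max_base]
    simp
  rw [pvMerge_spec, hlen]
  unfold pvGather
  rw [hmax]
  apply List.map_congr_left
  intro i hi
  have hgetD : (List.map (fun i => List.map (fun c => c.getD i "") pre)
      (List.range (pvMaxLen pre))).getD i (List.replicate pre.length "")
      = List.map (fun c => c.getD i "") pre := by
    by_cases h : i < pvMaxLen pre
    · rw [List.getD_eq_getElem?_getD, List.getElem?_map, List.getElem?_range h]
      simp
    · rw [List.getD_eq_default _ _ (by simp only [List.length_map, List.length_range]; omega)]
      exact (pv_row_blank pre i (by omega)).symm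
  rw [hgetD]
  simp

-- Source B's column fold computes the gathered table
theorem pv_fold_gather : ∀ (cs pre : List (List String)),
    List.foldl (fun (st : List (List String) × Nat) c => (pvMerge st.1 c st.2, st.2 + 1))
      (pvGather pre, pre.length) cs = (pvGather (pre ++ cs), (pre ++ cs).length) := by
  intro cs
  induction cs with
  | nil => intro pre; simp
  | cons c t ih =>
    intro pre
    have h1 : (pvMerge (pvGather pre) c pre.length, pre.length + 1)
        = (pvGather (pre ++ [c]), (pre ++ [c]).length) := by
      rw [pv_gather_snoc]; simp
    rw [List.foldl_cons]
    rw [show (pvMerge (pvGather pre) c pre.length, pre.length + 1)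
        = (pvGather (pre ++ [c]), (pre ++ [c]).length) from h1, ih (pre ++ [c])]
    simp [List.append_assoc]

-- ===== VERDICT (by name: the statement is the Claim_ definition above) =====
theorem print_list_table_spec : Claim_equal_print_list_table := by
  intro lis headers _ hpre
  unfold Pre_print_list_table at hpre
  simp only [Spec_print_list_table, print_list_table, print_list_table_alt]
  -- identify both sides' effective columns
  have hcols : (PySem.List.enumerate lis).map (fun jc =>
      if jc.1 < (headers.length : Int) then
        let h := headers.getD jc.1.toNat ""
        h :: String.ofList (List.replicate (PySem.Str.len h).toNat '-') :: jc.2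
      else jc.2) = pvAddHeaders lis headers := by
    simpa using pv_cols_eq headers lis 0
  set cols := pvAddHeaders lis headers with hcolsdef
  -- B side: its foldl over enumerate is the foldl over the effective columns
  have hB : (PySem.List.enumerate lis).foldl (fun st jc =>
      let cells := if jc.1 < (headers.length : Int) then
          let h := headers.getD jc.1.toNat ""
          h :: String.ofList (List.replicate (PySem.Str.len h).toNat '-') :: jc.2
        else jc.2
      (pvMerge st.1 cells st.2, st.2 + 1)) (([] : List (List String)), 0)
      = (pvGather cols, cols.length) := by
    have hmap := List.foldl_map
      (f := fun jc : Int × List String =>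
        if jc.1 < (headers.length : Int) then
          let h := headers.getD jc.1.toNat ""
          h :: String.ofList (List.replicate (PySem.Str.len h).toNat '-') :: jc.2
        else jc.2)
      (g := fun (st : List (List String) × Nat) c => (pvMerge st.1 c st.2, st.2 + 1))
      (l := PySem.List.enumerate lis) (init := (([] : List (List String)), 0))
    rw [← hmap, hcols]
    have := pv_fold_gather cols []
    simpa [pvGather, pvMaxLen] using this
  rw [hB]
  -- A side
  have hcne : cols ≠ [] := by
    intro h
    have hl := pv_length_addHeaders lis headers
    rw [← hcolsdef, h] at hl
    exact hpre (List.eq_nil_of_length_eq_zero hl.symm)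
  obtain ⟨m, hm⟩ : ∃ m, PySem.List.max?
      (cols.map (fun c => (c.length : Int))) (fun v => v) = some m := by
    rcases h : PySem.List.max? (cols.map (fun c => (c.length : Int)))
        (fun v => v) with _ | m
    · exact absurd (by
        simpa using (PySem.List.max?_eq_none_iff
          (cols.map (fun c => (c.length : Int))) (fun v => v)).mp h) hcne
    · exact ⟨m, h⟩
  rw [hm]
  simp only [Option.getD_some]
  have hbound : ∀ c ∈ cols, c.length ≤ m.toNat := by
    intro c hcmem
    have h1 : (c.length : Int) ≤ m :=
      PySem.List.max?_isMax hm _ (List.mem_map.mpr ⟨c, hcmem, rfl⟩)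
    omega
  have hmval : m.toNat = pvMaxLen cols := by
    have hmem := PySem.List.max?_mem hm
    obtain ⟨c, hc, hcm⟩ := List.mem_map.mp hmem
    have h1 : m.toNat ≤ pvMaxLen cols := by
      have := pv_len_le_maxLen cols c hc
      omega
    have h2 : pvMaxLen cols ≤ m.toNat := pv_maxLen_le cols m.toNat hbound
    omega
  have hzip : pvZipStar (cols.map
        (fun x => x ++ List.replicate (m.toNat - x.length) "")) =
      (List.range m.toNat).map (fun i =>
        (cols.map (fun x => x ++ List.replicate (m.toNat - x.length) "")).map
          (fun c => c.getD i "")) := by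
    refine pv_zipStar_uniform _ _ (by simpa using hcne) ?_
    intro c hcmem
    obtain ⟨c0, hc0, rfl⟩ := List.mem_map.mp hcmem
    have := hbound c0 hc0
    simp only [List.length_append, List.length_replicate]
    omega
  rw [hzip, hmval]
  congr 1
  unfold pvGather
  rw [List.map_map, List.map_map]
  apply List.map_congr_left
  intro i _
  simp only [Function.comp_apply]
  congr 1
  rw [List.map_map]
  exact List.map_congr_left (fun c _ => pv_pad_getD c _ i)
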